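-- pv_equiv track=rewrite | github.com/ReddyLab/ccgr_portal_data_loading | src/data_utilities/liftover.py | merge_mapping
-- ===== SOURCE A (Python) =====
-- def merge_mapping(mapping):
--     assert len(mapping) > 0
--     new_mapping = list(mapping[0])
--     for region in mapping[1:]:
--         if new_mapping[2] - region[1] > 100 or new_mapping[3] != region[3]:
--             raise ValueError("big gap")
--         new_mapping[2] = region[2]
--
--     return new_mapping
-- ===== SOURCE B (Python) =====
-- def merge_mapping(mapping):
--     assert len(mapping) > 0
--     if len(mapping) == 1:
--         return list(mapping[0])
--     merged = merge_mapping(mapping[:-1])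
--     last = mapping[-1]
--     if merged[2] - last[1] > 100 or merged[3] != last[3]:
--         raise ValueError("big gap")
--     merged[2] = last[2]
--     return merged
-- ===== Notes on version B (the rewrite author's own statement) =====
-- stated objective: alternative
-- what changed: B replaces A's left-to-right loop with a mutated accumulator by structural recursion on the prefix mapping[:-1]: the prefix is merged recursively and then the single last element is checked against and merged into that result.
import Mathlib
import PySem

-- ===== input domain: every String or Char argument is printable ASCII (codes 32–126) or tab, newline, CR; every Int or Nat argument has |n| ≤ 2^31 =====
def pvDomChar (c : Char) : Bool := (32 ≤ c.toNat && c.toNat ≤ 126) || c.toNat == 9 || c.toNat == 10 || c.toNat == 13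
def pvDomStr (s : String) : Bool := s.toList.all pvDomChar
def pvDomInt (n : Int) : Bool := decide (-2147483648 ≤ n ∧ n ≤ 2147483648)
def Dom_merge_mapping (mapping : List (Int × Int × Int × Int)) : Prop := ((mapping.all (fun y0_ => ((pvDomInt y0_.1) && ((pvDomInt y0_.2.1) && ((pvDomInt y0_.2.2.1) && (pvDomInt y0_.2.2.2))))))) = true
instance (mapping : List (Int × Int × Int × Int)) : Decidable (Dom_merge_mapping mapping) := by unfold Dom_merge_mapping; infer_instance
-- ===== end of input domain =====

-- B merges by structural recursion on the prefix mapping[:-1] instead of A's iterative accumulator loop; alternative decomposition, same checks.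


-- ===== PORT A =====
-- A's loop: new_mapping = list(mapping[0]); for each region, raise on a big gap,
-- else update new_mapping[2] := region[2].  A raise (and the failed assert on [])
-- is modelled by returning []; such inputs lie outside Pre_merge_mapping.
def mergeLoopA (a b c d : Int) : List (Int × Int × Int × Int) → List Int
  | [] => [a, b, c, d]
  | r :: rs =>
      if c - r.2.1 > 100 ∨ d ≠ r.2.2.2 then []
      else mergeLoopA a b r.2.2.1 d rs

def merge_mapping (mapping : List (Int × Int × Int × Int)) : List Int :=
  match mapping with
  | [] => []   -- assert len(mapping) > 0 fails: outside Pre_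
  | m :: rest => mergeLoopA m.1 m.2.1 m.2.2.1 m.2.2.2 rest

-- ===== PORT B =====
-- B: recursively merge the prefix mapping[:-1], then check the last element
-- against that merged result and fold it in.  A raise propagating from the
-- recursive call, or raised here, is modelled by [] (outside Pre_).
def merge_mapping_alt (mapping : List (Int × Int × Int × Int)) : List Int :=
  if h0 : mapping = [] then []   -- assert fails: outside Pre_
  else if mapping.length = 1 then
    match mapping.headI with
    | (a, b, c, d) => [a, b, c, d]
  else
    let merged := merge_mapping_alt mapping.dropLast
    let last := mapping.getLastD (0, 0, 0, 0)
    match merged with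
    | [a, b, c, d] =>
        if c - last.2.1 > 100 ∨ d ≠ last.2.2.2 then []   -- raise "big gap"
        else [a, b, last.2.2.1, d]
    | _ => []   -- a raise from the recursive call propagates
termination_by mapping.length
decreasing_by
  have : mapping.length ≠ 0 := by simpa using h0
  simp [List.length_dropLast]; omega

-- ===== PRECONDITION & SPEC =====
-- Pre_: exactly the inputs on which A returns normally: nonempty and every
-- consecutive pair has gap ≤ 100 and equal fourth (chromosome) fields
-- (pairwise equality of the fourth field is equivalent to A's comparison
-- of each element against the first).
def Pre_merge_mapping (mapping : List (Int × Int × Int × Int)) : Prop :=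
  mapping ≠ [] ∧
    List.IsChain (fun p q => p.2.2.1 - q.2.1 ≤ 100 ∧ p.2.2.2 = q.2.2.2) mapping
instance (mapping : List (Int × Int × Int × Int)) : Decidable (Pre_merge_mapping mapping) := by
  unfold Pre_merge_mapping; infer_instance

def pvWitness_merge_mapping : (List (Int × Int × Int × Int)) :=
  [(1, 10, 50, 7), (2, 40, 90, 7), (3, 95, 120, 7)]

def Spec_merge_mapping (mapping : List (Int × Int × Int × Int)) (out : List Int) : Prop := out = merge_mapping_alt mapping
instance (mapping : List (Int × Int × Int × Int)) (out : List Int) : Decidable (Spec_merge_mapping mapping out) := by unfold Spec_merge_mapping; infer_instance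

-- ===== CLAIM (what is proved, stated in full; the proofs are below) =====
def Claim_equal_merge_mapping : Prop := ∀ (mapping : List (Int × Int × Int × Int)), Dom_merge_mapping mapping → Pre_merge_mapping mapping → Spec_merge_mapping mapping (merge_mapping mapping)

-- ===== LEMMAS AND PROOFS =====

-- getLastD of a nonempty list does not depend on the default.
theorem getLastD_irrel {A : Type} (h : A) (t : List A) (d1 d2 : A) :
    (h :: t).getLastD d1 = (h :: t).getLastD d2 := by
  rw [List.getLastD_cons, List.getLastD_cons]

-- getLastD of a nonempty list is its getLast?.
theorem getLastD_mem_getLast? {A : Type} (h : A) (t : List A) (d : A) :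
    (h :: t).getLastD d ∈ (h :: t).getLast? := by
  induction t generalizing h with
  | nil => rfl
  | cons a t ih =>
      rw [List.getLastD_cons, getLastD_irrel a t h d, List.getLast?_cons_cons]
      exact ih a

-- The fourth field is constant along the chain.
theorem chain_fourth : ∀ (l : List (Int × Int × Int × Int)) (y : Int × Int × Int × Int),
    List.IsChain (fun p q => p.2.2.1 - q.2.1 ≤ 100 ∧ p.2.2.2 = q.2.2.2) (y :: l) →
    y.2.2.2 = ((y :: l).getLastD (0, 0, 0, 0)).2.2.2 := by
  intro l
  induction l with
  | nil => intro y _; simp [List.getLastD]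
  | cons z zs ih =>
      intro y h
      rw [List.isChain_cons_cons] at h
      rw [List.getLastD_cons, getLastD_irrel z zs y (0, 0, 0, 0)]
      exact h.1.2.trans (ih z h.2)

-- Under the chain condition A's loop never raises and its result is the closed form.
theorem mergeLoopA_ok (rest : List (Int × Int × Int × Int)) :
    ∀ a b c d : Int,
      List.IsChain (fun p q => p.2.2.1 - q.2.1 ≤ 100 ∧ p.2.2.2 = q.2.2.2)
        ((a, b, c, d) :: rest) →
      mergeLoopA a b c d rest = [a, b, (rest.getLastD (a, b, c, d)).2.2.1, d] := by
  induction rest with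
  | nil => intro a b c d _; simp [mergeLoopA, List.getLastD]
  | cons r rs ih =>
      intro a b c d h
      rw [List.isChain_cons] at h
      have h0 : c - r.2.1 ≤ 100 ∧ d = r.2.2.2 := by
        simpa using h.1 r (by simp)
      have hchain : List.IsChain (fun p q => p.2.2.1 - q.2.1 ≤ 100 ∧ p.2.2.2 = q.2.2.2)
          ((a, b, r.2.2.1, d) :: rs) := by
        have h2 := h.2
        rw [List.isChain_cons] at h2 ⊢
        refine ⟨fun y hy => ?_, h2.2⟩
        have := h2.1 y hy
        exact ⟨this.1, h0.2.trans this.2⟩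
      have hrec := ih a b r.2.2.1 d hchain
      have hneg : ¬ (c - r.2.1 > 100 ∨ d ≠ r.2.2.2) := by
        rintro (hgt | hne)
        · omega
        · exact hne h0.2
      rw [mergeLoopA, if_neg hneg, hrec]
      rcases rs with _ | ⟨s, ss⟩
      · simp [List.getLastD]
      · rw [show ((r :: s :: ss).getLastD (a, b, c, d)) = (s :: ss).getLastD r from by
            rw [List.getLastD_cons],
          getLastD_irrel s ss (a, b, r.2.2.1, d) r]

-- Under the chain condition B's recursion produces the same closed form.
theorem merge_alt_ok :
    ∀ (mapping : List (Int × Int × Int × Int)), mapping ≠ [] →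
      List.IsChain (fun p q => p.2.2.1 - q.2.1 ≤ 100 ∧ p.2.2.2 = q.2.2.2) mapping →
      merge_mapping_alt mapping
        = [mapping.headI.1, mapping.headI.2.1,
           (mapping.getLastD (0, 0, 0, 0)).2.2.1, mapping.headI.2.2.2] := by
  intro mapping
  induction mapping using List.reverseRecOn with
  | nil => intro h; exact absurd rfl h
  | append_singleton xs x ih =>
      intro _ hchain
      rcases xs with _ | ⟨y, ys⟩
      · simp [merge_mapping_alt, List.getLastD]
      · have hne : (y :: ys) ++ [x] ≠ [] := by simp
        have hlen : ((y :: ys) ++ [x]).length ≠ 1 := by simp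
        have hsplit := (List.isChain_append
          (l₁ := y :: ys) (l₂ := [x])
          (R := fun p q => p.2.2.1 - q.2.1 ≤ 100 ∧ p.2.2.2 = q.2.2.2)).mp hchain
        have hpre := ih (by simp) hsplit.1
        have hlast := hsplit.2.2 _ (getLastD_mem_getLast? y ys (0, 0, 0, 0)) x (by simp)
        have h4 : y.2.2.2 = x.2.2.2 := (chain_fourth ys y hsplit.1).trans hlast.2
        have hx1 : ((y :: ys ++ [x]).getLastD (0, 0, 0, 0)) = x := by
          rw [show y :: ys ++ [x] = (y :: ys) ++ [x] from by simp, List.getLastD_concat]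
        have hdl : (y :: ys ++ [x]).dropLast = y :: ys := by
          rw [show y :: ys ++ [x] = (y :: ys) ++ [x] from by simp, List.dropLast_concat]
        have hneg : ¬ (((y :: ys).getLastD (0, 0, 0, 0)).2.2.1 - x.2.1 > 100
            ∨ (y :: ys).headI.2.2.2 ≠ x.2.2.2) := by
          rintro (hgt | hne')
          · have := hlast.1; omega
          · exact hne' h4
        rw [merge_mapping_alt, dif_neg hne, if_neg hlen, hdl, hpre, hx1]
        show (if ((y :: ys).getLastD (0, 0, 0, 0)).2.2.1 - x.2.1 > 100
              ∨ (y :: ys).headI.2.2.2 ≠ x.2.2.2 then ([] : List Int)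
          else [(y :: ys).headI.1, (y :: ys).headI.2.1, x.2.2.1, (y :: ys).headI.2.2.2])
          = [(y :: ys ++ [x]).headI.1, (y :: ys ++ [x]).headI.2.1, x.2.2.1,
             (y :: ys ++ [x]).headI.2.2.2]
        rw [if_neg hneg]
        simp [List.headI]

theorem merge_mapping_spec : Claim_equal_merge_mapping := by
  intro mapping _ hpre
  unfold Spec_merge_mapping
  obtain ⟨hne, hchain⟩ := hpre
  rcases mapping with _ | ⟨m, rest⟩
  · exact absurd rfl hne
  · obtain ⟨a, b, c, d⟩ := m
    rw [merge_mapping, mergeLoopA_ok rest a b c d hchain,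
        merge_alt_ok ((a, b, c, d) :: rest) (by simp) hchain]
    cases rest with
    | nil => simp [List.getLastD]
    | cons h t =>
        rw [show (((a, b, c, d) :: h :: t).getLastD (0, 0, 0, 0)) = (h :: t).getLastD (a, b, c, d)
            from by rw [List.getLastD_cons]]
        simp [List.headI]
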